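-- pv_equiv track=rewrite | github.com/jsteffen/emergency_response_dialogue | slot_tagging/adapters_bio_tags_server.py | merge_labels
-- ===== SOURCE A (Python) =====
-- def merge_labels(pred_labels, subtokens):
--     current_labels = set()
--     merged_labels = []
--     for idx, tok in enumerate(subtokens):
--         # skip first subtoken, as it's a beginning-of-sentence marker
--         if idx == 0:
--             continue
--         if tok.startswith('##'):
--             # add to current token label set
--             current_labels.add(pred_labels[idx])
--         else:
--             # new token start found
--             # first determine the label of the current token,
--             if 'B' in current_labels:
--                 # B overrides I
--                 merged_labels.append('B')
--             elif 'I' in current_labels: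
--                 # label dependes on the previous label:
--                 # if O -> B, if B or I -> I
--                 if merged_labels[-1] == 'O':
--                     merged_labels.append('B')
--                 else:
--                     merged_labels.append('I')
--             else:
--                 merged_labels.append('O')
--             current_labels.clear()
--             current_labels.add(pred_labels[idx])
--     # handle last token
--     if 'B' in current_labels:
--         merged_labels.append('B')
--     elif 'I' in current_labels:
--         if merged_labels[-1] == 'O':
--             merged_labels.append('B')
--         else:
--             merged_labels.append('I')
--     else:
--         merged_labels.append('O')
--     return merged_labels[1:]
-- ===== SOURCE B (Python) =====
-- def merge_labels(pred_labels, subtokens):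
--     # pass 1: group the subtoken labels by token (a '##' subtoken joins the last group)
--     groups = [set()]
--     for idx in range(1, len(subtokens)):
--         if subtokens[idx].startswith('##'):
--             groups[-1].add(pred_labels[idx])
--         else:
--             groups.append({pred_labels[idx]})
--     # pass 2: turn each group's label set into one label
--     out = []
--     for g in groups:
--         if 'B' in g:
--             out.append('B')
--         elif 'I' in g:
--             out.append('B' if out[-1] == 'O' else 'I')
--         else:
--             out.append('O')
--     return out[1:]
-- ===== Notes on version B (the rewrite author's own statement) =====
-- stated objective: simpler
-- what changed: B separates the work into two passes - first group the subtoken label sets per token, then label each group with one shared decision rule - replacing A's fused single loop whose token-labelling block is duplicated for the last token.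
import Mathlib
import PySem

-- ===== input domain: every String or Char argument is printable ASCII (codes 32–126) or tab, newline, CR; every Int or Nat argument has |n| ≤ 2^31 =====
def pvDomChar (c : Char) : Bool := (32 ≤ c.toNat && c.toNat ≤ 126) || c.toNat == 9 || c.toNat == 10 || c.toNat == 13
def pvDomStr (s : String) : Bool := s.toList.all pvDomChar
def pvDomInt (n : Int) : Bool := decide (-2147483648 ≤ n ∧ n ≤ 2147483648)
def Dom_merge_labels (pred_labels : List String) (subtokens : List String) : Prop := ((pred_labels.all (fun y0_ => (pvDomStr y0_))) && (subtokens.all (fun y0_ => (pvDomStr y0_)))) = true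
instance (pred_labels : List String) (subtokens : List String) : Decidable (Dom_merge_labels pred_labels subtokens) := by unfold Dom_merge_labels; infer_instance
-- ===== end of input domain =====

-- B replaces A's fused loop (with its duplicated last-token block) by two passes — group the
-- subtoken label sets first, then label every group with the one shared decision rule (simpler).
-- Both Pythons raise on the same inputs (excluded by Pre_); equivalence is about return values.

-- ===== PORT A =====
-- decision rule shared verbatim by both Pythons ('B' in set → B; 'I' → B/I by previous label; else O);
-- merged_labels[-1] is ported as pyGetD _ (-1) "" — exact under Pre_, which rules out the IndexError.
def decideLabel (g : PySem.Set String) (out : List String) : String :=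
  if PySem.Set.contains g "B" then "B"
  else if PySem.Set.contains g "I" then
    (if PySem.List.pyGetD out (-1) "" == "O" then "B" else "I")
  else "O"

-- pred_labels[idx] is ported as pyGetD _ idx "" — exact under Pre_, which rules out the IndexError.
def merge_labels (pred_labels : List String) (subtokens : List String) : List String :=
  let st := (PySem.List.enumerate subtokens).foldl
    (fun (st : PySem.Set String × List String) p =>
      if p.1 == 0 then st     -- skip first subtoken
      else if PySem.Str.startswith p.2 "##" then
        (PySem.Set.add st.1 (PySem.List.pyGetD pred_labels p.1 ""), st.2)
      else
        (PySem.Set.add PySem.Set.empty (PySem.List.pyGetD pred_labels p.1 ""),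
         st.2 ++ [decideLabel st.1 st.2]))
    (PySem.Set.empty, [])
  PySem.List.slice (st.2 ++ [decideLabel st.1 st.2]) (some 1) none

-- ===== PORT B =====
-- groups[-1].add(x): add x to the last group
def pvUpdLast : List (PySem.Set String) → String → List (PySem.Set String)
  | [], _ => []
  | [g], x => [PySem.Set.add g x]
  | g :: g' :: rest, x => g :: pvUpdLast (g' :: rest) x

def merge_labels_alt (pred_labels : List String) (subtokens : List String) : List String :=
  -- pass 1: group the subtoken labels by token
  let groups := (PySem.List.pyRange 1 (subtokens.length : Int) 1).foldl
    (fun gs idx =>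
      if PySem.Str.startswith (PySem.List.pyGetD subtokens idx "") "##" then
        pvUpdLast gs (PySem.List.pyGetD pred_labels idx "")
      else gs ++ [PySem.Set.add PySem.Set.empty (PySem.List.pyGetD pred_labels idx "")])
    [PySem.Set.empty]
  -- pass 2: turn each group's label set into one label
  let out := groups.foldl (fun out g => out ++ [decideLabel g out]) []
  PySem.List.slice out (some 1) none

-- ===== PRECONDITION & SPEC =====
-- Pre_ excludes exactly the inputs where Python A raises (B raises there too): an IndexError on
-- pred_labels[idx] when pred_labels is shorter than subtokens, and an IndexError on
-- merged_labels[-1] when the first token group ('##'-subtokens right after the sentence marker)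
-- contains 'I' but no 'B', so the previous label is read before any label exists.
def Pre_merge_labels (pred_labels : List String) (subtokens : List String) : Prop :=
  (subtokens.length ≤ 1 ∨ subtokens.length ≤ pred_labels.length) ∧
  ¬ ("I" ∈ ((((subtokens.drop 1).zip (pred_labels.drop 1)).takeWhile
        (fun p => PySem.Str.startswith p.1 "##")).map (·.2)) ∧
     "B" ∉ ((((subtokens.drop 1).zip (pred_labels.drop 1)).takeWhile
        (fun p => PySem.Str.startswith p.1 "##")).map (·.2)))
instance (pred_labels : List String) (subtokens : List String) : Decidable (Pre_merge_labels pred_labels subtokens) := by unfold Pre_merge_labels; infer_instance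
def pvWitness_merge_labels : List String × List String := (["O", "B", "I"], ["[CLS]", "x", "##y"])

def Spec_merge_labels (pred_labels : List String) (subtokens : List String) (out : List String) : Prop := out = merge_labels_alt pred_labels subtokens
instance (pred_labels : List String) (subtokens : List String) (out : List String) : Decidable (Spec_merge_labels pred_labels subtokens out) := by unfold Spec_merge_labels; infer_instance

-- ===== CLAIM (what is proved, stated in full; the proofs are below) =====
def Claim_equal_merge_labels : Prop := ∀ (pred_labels : List String) (subtokens : List String), Dom_merge_labels pred_labels subtokens → Pre_merge_labels pred_labels subtokens → Spec_merge_labels pred_labels subtokens (merge_labels pred_labels subtokens)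

-- ===== LEMMAS AND PROOFS =====

-- abstract step functions of the two ports, over (subtoken, its predicted label) pairs
def pvF (st : PySem.Set String × List String) (q : String × String) : PySem.Set String × List String :=
  if PySem.Str.startswith q.1 "##" then (PySem.Set.add st.1 q.2, st.2)
  else (PySem.Set.add PySem.Set.empty q.2, st.2 ++ [decideLabel st.1 st.2])

def pvG (gs : List (PySem.Set String)) (q : String × String) : List (PySem.Set String) :=
  if PySem.Str.startswith q.1 "##" then pvUpdLast gs q.2
  else gs ++ [PySem.Set.add PySem.Set.empty q.2]

def pvL (out : List String) (g : PySem.Set String) : List String := out ++ [decideLabel g out]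

lemma pvUpdLast_cons (g0 : PySem.Set String) (gs : List (PySem.Set String)) (x : String)
    (h : gs ≠ []) : pvUpdLast (g0 :: gs) x = g0 :: pvUpdLast gs x := by
  cases gs with
  | nil => exact absurd rfl h
  | cons a l => rfl

lemma pvUpdLast_ne_nil (gs : List (PySem.Set String)) (x : String) (h : gs ≠ []) :
    pvUpdLast gs x ≠ [] := by
  cases gs with
  | nil => exact absurd rfl h
  | cons a l => cases l <;> simp [pvUpdLast]

lemma pvG_ne_nil (gs : List (PySem.Set String)) (q : String × String) (h : gs ≠ []) :
    pvG gs q ≠ [] := by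
  unfold pvG
  split
  · exact pvUpdLast_ne_nil gs q.2 h
  · simp

lemma foldl_pvG_cons (items : List (String × String)) (g0 : PySem.Set String) :
    ∀ (gs : List (PySem.Set String)), gs ≠ [] →
      items.foldl pvG (g0 :: gs) = g0 :: items.foldl pvG gs := by
  induction items with
  | nil => intro gs _; rfl
  | cons q rest ih =>
      intro gs h
      have hstep : pvG (g0 :: gs) q = g0 :: pvG gs q := by
        unfold pvG
        split
        · exact pvUpdLast_cons g0 gs q.2 h
        · rfl
      simp only [List.foldl_cons, hstep]
      exact ih (pvG gs q) (pvG_ne_nil gs q h)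

-- two-pass grouping+labelling equals the fused fold, finalized with one more decision
lemma pvMain (items : List (String × String)) :
    ∀ (cur : PySem.Set String) (merged : List String),
      (items.foldl pvG [cur]).foldl pvL merged =
        (items.foldl pvF (cur, merged)).2 ++
          [decideLabel (items.foldl pvF (cur, merged)).1 (items.foldl pvF (cur, merged)).2] := by
  induction items with
  | nil => intro cur merged; simp [pvL]
  | cons q rest ih =>
      intro cur merged
      by_cases h : PySem.Str.startswith q.1 "##" = true
      · have h1 : pvG [cur] q = [PySem.Set.add cur q.2] := by
          unfold pvG; rw [if_pos h]; rfl
        have h2 : pvF (cur, merged) q = (PySem.Set.add cur q.2, merged) := by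
          unfold pvF; rw [if_pos h]
        simp only [List.foldl_cons, h1, h2]
        exact ih (PySem.Set.add cur q.2) merged
      · have h1 : pvG [cur] q = cur :: [PySem.Set.add PySem.Set.empty q.2] := by
          unfold pvG; rw [if_neg h]; rfl
        have h2 : pvF (cur, merged) q =
            (PySem.Set.add PySem.Set.empty q.2, merged ++ [decideLabel cur merged]) := by
          unfold pvF; rw [if_neg h]
        simp only [List.foldl_cons, h1, h2]
        rw [foldl_pvG_cons rest cur [PySem.Set.add PySem.Set.empty q.2] (by simp)]
        simp only [List.foldl_cons]
        exact ih (PySem.Set.add PySem.Set.empty q.2) (pvL merged cur)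

-- A's loop, past the skipped index 0, is the pvF-fold over (subtoken, label) pairs
lemma pvAfold (pred_labels : List String) (tl : List String) :
    ∀ (i : Int), 1 ≤ i → ∀ (st : PySem.Set String × List String),
      (PySem.List.enumerate tl i).foldl
        (fun (st : PySem.Set String × List String) p =>
          if p.1 == 0 then st
          else if PySem.Str.startswith p.2 "##" then
            (PySem.Set.add st.1 (PySem.List.pyGetD pred_labels p.1 ""), st.2)
          else
            (PySem.Set.add PySem.Set.empty (PySem.List.pyGetD pred_labels p.1 ""),
             st.2 ++ [decideLabel st.1 st.2])) st
      = ((PySem.List.enumerate tl i).map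
          (fun p => (p.2, PySem.List.pyGetD pred_labels p.1 ""))).foldl pvF st := by
  induction tl with
  | nil => intro i _ st; simp [PySem.List.enumerate_nil]
  | cons t rest ih =>
      intro i hi st
      rw [PySem.List.enumerate_cons]
      simp only [List.map_cons, List.foldl_cons]
      have hz : (i == 0) = false := by simp; omega
      rw [hz]
      have hstep :
          (if PySem.Str.startswith t "##" then
            (PySem.Set.add st.1 (PySem.List.pyGetD pred_labels i ""), st.2)
          else
            (PySem.Set.add PySem.Set.empty (PySem.List.pyGetD pred_labels i ""),
             st.2 ++ [decideLabel st.1 st.2]))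
          = pvF st (t, PySem.List.pyGetD pred_labels i "") := by
        simp [pvF]
      simp only [Bool.false_eq_true, if_false, hstep]
      exact ih (i + 1) (by omega) _
  -- the enumerate pairs of the tail are the index-range pairs of the whole list
lemma pvItemsEq (pred_labels : List String) :
    ∀ (d : Nat) (sub : List String) (i : Nat), sub.length - i = d →
      (PySem.List.enumerate (sub.drop i) (i : Int)).map
          (fun p => (p.2, PySem.List.pyGetD pred_labels p.1 ""))
        = (PySem.List.pyRange (i : Int) (sub.length : Int) 1).map
            (fun j => (PySem.List.pyGetD sub j "", PySem.List.pyGetD pred_labels j "")) := by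
  intro d
  induction d with
  | zero =>
      intro sub i h
      have hle : sub.length ≤ i := by omega
      rw [List.drop_eq_nil_of_le hle, PySem.List.pyRange_one_eq_nil (by exact_mod_cast hle)]
      simp [PySem.List.enumerate_nil]
  | succ d ih =>
      intro sub i h
      have hlt : i < sub.length := by omega
      rw [List.drop_eq_getElem_cons hlt, PySem.List.enumerate_cons,
          PySem.List.pyRange_one_cons (by exact_mod_cast hlt)]
      simp only [List.map_cons]
      congr 1
      · have : PySem.List.pyGetD sub ((i : Nat) : Int) "" = sub[i] := by
          simp [PySem.List.pyGetD_natCast, List.getD_eq_getElem?_getD, hlt]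
        rw [this]
      · have hcast : ((i : Nat) : Int) + 1 = (((i + 1 : Nat)) : Int) := by push_cast; ring
        rw [hcast]
        exact ih sub (i + 1) (by omega)

lemma pvEqual (pred_labels : List String) (subtokens : List String) :
    merge_labels pred_labels subtokens = merge_labels_alt pred_labels subtokens := by
  cases subtokens with
  | nil => rfl
  | cons s0 tl =>
      have hitems := pvItemsEq pred_labels ((s0 :: tl).length - 1) (s0 :: tl) 1 rfl
      simp only [List.drop_succ_cons, List.drop_zero, Nat.cast_one] at hitems
      unfold merge_labels merge_labels_alt
      rw [PySem.List.enumerate_cons]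
      simp only [List.foldl_cons, zero_add]
      rw [show ((0 : Int) == 0) = true from rfl]
      simp only [if_true]
      rw [pvAfold pred_labels tl 1 (by omega) (PySem.Set.empty, [])]
      rw [hitems]
      rw [show (List.foldl
            (fun gs idx =>
              if PySem.Str.startswith (PySem.List.pyGetD (s0 :: tl) idx "") "##" then
                pvUpdLast gs (PySem.List.pyGetD pred_labels idx "")
              else gs ++ [PySem.Set.add PySem.Set.empty (PySem.List.pyGetD pred_labels idx "")])
            [PySem.Set.empty] (PySem.List.pyRange 1 (((s0 :: tl).length : Nat) : Int) 1))
          = List.foldl pvG [PySem.Set.empty]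
              ((PySem.List.pyRange 1 (((s0 :: tl).length : Nat) : Int) 1).map
                (fun j => (PySem.List.pyGetD (s0 :: tl) j "", PySem.List.pyGetD pred_labels j "")))
        from by rw [List.foldl_map]; rfl]
      rw [show (fun (out : List String) (g : PySem.Set String) => out ++ [decideLabel g out]) = pvL
        from rfl]
      rw [pvMain]

-- ===== VERDICT (by name: the statement is the Claim_ definition above) =====
theorem merge_labels_spec : Claim_equal_merge_labels := by
  intro pred_labels subtokens _ _
  unfold Spec_merge_labels
  exact pvEqual pred_labels subtokens
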